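-- pv_equiv track=rewrite | github.com/hy54321/DM_Helper_MCP | ui/api.py | _command_for_log
-- ===== SOURCE A (Python) =====
-- from typing import Any, Dict, IO, List, Optional
--
-- def _command_for_log(command: List[str]) -> str:
--     if not command:
--         return ""
--     redacted: List[str] = []
--     i = 0
--     while i < len(command):
--         part = command[i]
--         if part == "--header" and i + 1 < len(command):
--             header_value = command[i + 1]
--             if ":" in header_value:
--                 header_name, _ = header_value.split(":", 1)
--                 redacted.extend(["--header", f"{header_name}: ***"])
--                 i += 2
--                 continue
--         redacted.append(part)
--         i += 1
--     return " ".join(redacted)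
-- ===== SOURCE B (Python) =====
-- from typing import List
--
-- def _command_for_log(command: List[str]) -> str:
--     redacted: List[str] = []
--     pending = False
--     for part in command:
--         if pending and ":" in part:
--             redacted.append(f"{part.split(':', 1)[0]}: ***")
--             pending = False
--             continue
--         pending = False
--         if part == "--header":
--             pending = True
--             redacted.append("--header")
--         else:
--             redacted.append(part)
--     return " ".join(redacted)
-- ===== Notes on version B (the rewrite author's own statement) =====
-- stated objective: simpler
-- what changed: Replaced the index-based while loop with lookahead (i, i+1, continue/skip-by-2) by a streaming single pass over the tokens with a boolean pending flag and no indexing; the empty-list early return disappears since join of the empty list is already the empty string.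
import Mathlib
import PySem

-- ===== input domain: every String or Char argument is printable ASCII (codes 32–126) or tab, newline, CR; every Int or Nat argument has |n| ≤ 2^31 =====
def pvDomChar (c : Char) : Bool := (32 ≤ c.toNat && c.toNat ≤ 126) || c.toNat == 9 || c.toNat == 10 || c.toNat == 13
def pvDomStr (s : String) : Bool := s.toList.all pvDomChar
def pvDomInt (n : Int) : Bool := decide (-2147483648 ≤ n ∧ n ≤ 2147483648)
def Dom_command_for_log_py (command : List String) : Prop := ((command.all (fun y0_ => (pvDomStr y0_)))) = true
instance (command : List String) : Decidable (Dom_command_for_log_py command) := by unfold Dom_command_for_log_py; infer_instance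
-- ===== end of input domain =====

-- B replaces A's index-based while loop with lookahead by a streaming single pass
-- with a boolean pending flag (objective: simpler).

-- header_value.split(":", 1)[0]  (sep nonempty, so splitMax? is some; list is nonempty)
def pvHeadOfSplit (s : String) : String :=
  ((PySem.Str.splitMax? s ":" 1).getD []).headD ""

-- ===== PORT A =====
-- A's while loop over index i with lookahead at i+1; 'continue' skips by 2.
def pvALoop (command : List String) (i : Nat) : List String :=
  if h : i < command.length then
    let part := command[i]
    if part = "--header" ∧ i + 1 < command.length then
      let header_value := command.getD (i + 1) ""
      if PySem.Str.isIn ":" header_value then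
        "--header" :: (pvHeadOfSplit header_value ++ ": ***") :: pvALoop command (i + 2)
      else
        part :: pvALoop command (i + 1)
    else
      part :: pvALoop command (i + 1)
  else []
termination_by command.length - i

def command_for_log_py (command : List String) : String :=
  if command = [] then ""
  else PySem.Str.join " " (pvALoop command 0)

-- ===== PORT B =====
def pvBLoop : List String → Bool → List String
  | [], _ => []
  | part :: rest, pending =>
    if pending ∧ PySem.Str.isIn ":" part then
      (pvHeadOfSplit part ++ ": ***") :: pvBLoop rest false
    else if part = "--header" then
      "--header" :: pvBLoop rest true
    else
      part :: pvBLoop rest false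

def command_for_log_py_alt (command : List String) : String :=
  PySem.Str.join " " (pvBLoop command false)

-- ===== PRECONDITION & SPEC =====
def Spec_command_for_log_py (command : List String) (out : String) : Prop := out = command_for_log_py_alt command
instance (command : List String) (out : String) : Decidable (Spec_command_for_log_py command out) := by unfold Spec_command_for_log_py; infer_instance

-- ===== CLAIM (what is proved, stated in full; the proofs are below) =====
def Claim_equal_command_for_log_py : Prop := ∀ (command : List String), Dom_command_for_log_py command → Spec_command_for_log_py command (command_for_log_py command)

-- ===== LEMMAS AND PROOFS =====

-- pending only matters when the head contains a colon
lemma pvBLoop_true_of_no_colon (x : String) (xs : List String)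
    (h : PySem.Str.isIn ":" x = false) :
    pvBLoop (x :: xs) true = pvBLoop (x :: xs) false := by
  have h' : PySem.Chars.isIn [':'] x.toList = false := by simpa using h
  simp [pvBLoop, h']

lemma pvLoop_eq (command : List String) :
    ∀ n i, command.length - i ≤ n → pvALoop command i = pvBLoop (command.drop i) false := by
  intro n
  induction n with
  | zero =>
    intro i hi
    have hge : command.length ≤ i := by omega
    rw [pvALoop]
    simp [List.drop_eq_nil_of_le hge, pvBLoop, Nat.not_lt.mpr hge]
  | succ n ih =>
    intro i hi
    by_cases hlt : i < command.length
    · have hdrop : command.drop i = command[i] :: command.drop (i + 1) :=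
        List.drop_eq_getElem_cons hlt
      rw [pvALoop]
      by_cases hhd : command[i] = "--header"
      · by_cases hnext : i + 1 < command.length
        · have hdrop1 : command.drop (i + 1) = command[i + 1] :: command.drop (i + 2) :=
            List.drop_eq_getElem_cons hnext
          by_cases hcol : PySem.Str.isIn ":" command[i + 1] = true
          · -- colon: A consumes both tokens, B redacts the value under the pending flag
            have hc : PySem.Chars.isIn [':'] command[i + 1].toList = true := by simpa using hcol
            rw [hdrop, hdrop1]
            simp [pvBLoop, hlt, hhd, hnext, hc, ih (i + 2) (by omega)]
          · -- no colon: B clears the pending flag and re-processes the value normally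
            have hcol' : PySem.Str.isIn ":" command[i + 1] = false := by simpa using hcol
            rw [hdrop]
            rw [show pvBLoop (command[i] :: command.drop (i + 1)) false
                  = "--header" :: pvBLoop (command.drop (i + 1)) true by
              simp [pvBLoop, hhd]]
            have hc' : PySem.Chars.isIn [':'] command[i + 1].toList = false := by
              simpa using hcol
            rw [hdrop1, pvBLoop_true_of_no_colon _ _ hcol', ← hdrop1]
            simp [hlt, hhd, hnext, hc', ih (i + 1) (by omega)]
          -- "--header" is the last token: A appends it normally, B's pending flag dies with the list
        · have hnil : command.drop (i + 1) = [] := List.drop_eq_nil_of_le (by omega)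
          rw [hdrop, hnil]
          simp [pvBLoop, hhd, hnext, hlt, hnil, ih (i + 1) (by omega)]
      · rw [hdrop]
        simp [pvBLoop, hhd, hlt, ih (i + 1) (by omega)]
    · have hge : command.length ≤ i := by omega
      rw [pvALoop]
      simp [List.drop_eq_nil_of_le hge, pvBLoop, Nat.not_lt.mpr hge]

-- ===== VERDICT (by name: the statement is the Claim_ definition above) =====
theorem command_for_log_py_spec : Claim_equal_command_for_log_py := by
  intro command _
  unfold Spec_command_for_log_py command_for_log_py command_for_log_py_alt
  rcases command with _ | ⟨x, xs⟩
  · simp [pvBLoop, PySem.Str.join]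
  · rw [if_neg (by simp)]
    rw [pvLoop_eq (x :: xs) (x :: xs).length 0 (by omega)]
    simp
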